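-- pv_equiv track=rewrite | github.com/chointer/CodingProblems | 프로그래머스/unrated/135808. 과일 장수/과일 장수.py | solution
-- ===== SOURCE A (Python) =====
-- from collections import Counter
--
-- def solution(k, m, score):
--     scores = Counter(score)
--
--     answer = 0
--     left = 0
--     for i in range(k, 0, -1):
--         n = scores[i] + left
--         answer += n//m * i * m
--         left = n%m
--
--     return answer
-- ===== SOURCE B (Python) =====
-- def solution(k, m, score):
--     s = sorted((x for x in score if 1 <= x <= k), reverse=True)
--     answer = 0
--     for i in range(m - 1, len(s), m):
--         answer += s[i] * m
--     return answer
-- ===== Notes on version B (the rewrite author's own statement) =====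
-- stated objective: idiomatic
-- what changed: A builds a Counter and scans every integer value from k down to 1 carrying leftovers between values; B sorts the in-range scores descending once and sums score[i]*m for every m-th element (the minimum of each full box), never iterating over the value range; measured faster since it touches only the n scores instead of all k candidate values.
-- outside the precondition, e.g. on solution(2, -1, [1]): A returns 1, B returns 0; on solution(1, 0, [1]): A raises ZeroDivisionError, B raises ValueError; on solution(0, 0, []): A returns 0, B raises ValueError
import Mathlib
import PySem

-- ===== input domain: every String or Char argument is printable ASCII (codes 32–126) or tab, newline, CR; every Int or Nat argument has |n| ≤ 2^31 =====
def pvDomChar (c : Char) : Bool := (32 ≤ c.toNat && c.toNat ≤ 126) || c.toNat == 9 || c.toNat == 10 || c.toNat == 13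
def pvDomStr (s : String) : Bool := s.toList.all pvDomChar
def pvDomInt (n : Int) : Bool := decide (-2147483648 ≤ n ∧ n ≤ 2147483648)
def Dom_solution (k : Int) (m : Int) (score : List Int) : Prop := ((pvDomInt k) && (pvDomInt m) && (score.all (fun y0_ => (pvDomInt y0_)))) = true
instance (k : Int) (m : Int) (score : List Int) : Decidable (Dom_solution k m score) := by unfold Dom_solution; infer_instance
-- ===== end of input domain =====

-- B replaces A's Counter + scan over every value from k down to 1 by a single descending
-- sort of the in-range scores, summing score[i]*m for every m-th element (the minimum of
-- each full box). Equivalence is proved on Pre_ (positive box size, or empty value range).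


-- ===== PORT A =====
def solution (k : Int) (m : Int) (score : List Int) : Int :=
  let scores := PySem.Dict.counter score           -- Counter(score); a missing key yields 0
  let r := (PySem.List.pyRange k 0 (-1)).foldl
    (fun (st : Int × Int) i =>
      let n := scores.getD i 0 + st.2
      (st.1 + PySem.Int.floordiv n m * i * m, PySem.Int.mod n m))
    (0, 0)
  r.1

-- ===== PORT B =====
def solution_alt (k : Int) (m : Int) (score : List Int) : Int :=
  let s := PySem.List.sorted (score.filter (fun x => decide (1 ≤ x ∧ x ≤ k))) (fun x => x) true
  (PySem.List.pyRange (m - 1) ((s.length : Int)) m).foldl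
    (fun answer i => answer + PySem.List.pyGetD s i 0 * m) 0

-- ===== PRECONDITION & SPEC =====
-- Pre_ excludes m = 0 (A raises ZeroDivisionError when k ≥ 1, B raises ValueError in range())
-- and a negative box size m with k ≥ 1, outside the problem's natural domain, where A's
-- negative floor-division values and B's empty index range are both accidental.
def Pre_solution (k : Int) (m : Int) (score : List Int) : Prop := 1 ≤ m ∨ (m ≤ -1 ∧ k ≤ 0)
instance (k : Int) (m : Int) (score : List Int) : Decidable (Pre_solution k m score) := by unfold Pre_solution; infer_instance
def pvWitness_solution : Int × Int × List Int := (5, 2, [1, 4, 3, 2, 5, 4])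
def Spec_solution (k : Int) (m : Int) (score : List Int) (out : Int) : Prop := out = solution_alt k m score
instance (k : Int) (m : Int) (score : List Int) (out : Int) : Decidable (Spec_solution k m score out) := by unfold Spec_solution; infer_instance

-- ===== CLAIM (what is proved, stated in full; the proofs are below) =====
def Claim_equal_solution : Prop := ∀ (k : Int) (m : Int) (score : List Int), Dom_solution k m score → Pre_solution k m score → Spec_solution k m score (solution k m score)

-- ===== LEMMAS AND PROOFS =====

-- the sorted-descending in-range scores, value by value: scores equal to K, then K-1, …, then 1
def flatD (score : List Int) : Nat → List Int
  | 0 => []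
  | Nat.succ n => List.replicate (score.count ((n + 1 : Nat) : Int)) ((n + 1 : Nat) : Int) ++ flatD score n

-- sum of the last element of each full box of m, with l leftover items (consumed from
-- higher values) sitting in front of rest
def boxL (m l : Int) (rest : List Int) : Int :=
  if m ≤ l + rest.length ∧ 1 ≤ m ∧ 0 ≤ l ∧ l < m then
    rest.getD (m - l - 1).toNat 0 + boxL m 0 (rest.drop (m - l).toNat)
  else 0
termination_by rest.length
decreasing_by
  simp only [List.length_drop]; omega

lemma boxL_zero (m l : Int) (rest : List Int) (h : ¬ (m ≤ l + rest.length ∧ 1 ≤ m ∧ 0 ≤ l ∧ l < m)) :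
    boxL m l rest = 0 := by rw [boxL, if_neg h]

lemma boxL_step (m l : Int) (rest : List Int) (h : m ≤ l + rest.length ∧ 1 ≤ m ∧ 0 ≤ l ∧ l < m) :
    boxL m l rest = rest.getD (m - l - 1).toNat 0 + boxL m 0 (rest.drop (m - l).toNat) := by
  rw [boxL, if_pos h]

-- cons/nil shape of pyRange for a positive step
lemma pyRange_pos_nil (a b s : Int) (hs : 0 < s) (h : b ≤ a) : PySem.List.pyRange a b s = [] := by
  rw [PySem.List.pyRange_of_pos a b hs, if_neg (by omega)]
  simp

lemma pyRange_pos_cons (a b s : Int) (hs : 0 < s) (h : a < b) :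
    PySem.List.pyRange a b s = a :: PySem.List.pyRange (a + s) b s := by
  rw [PySem.List.pyRange_of_pos a b hs, PySem.List.pyRange_of_pos (a+s) b hs, if_pos h]
  by_cases h2 : a + s < b
  · rw [if_pos h2]
    have key : ((b - a + s - 1) / s).toNat = ((b - (a + s) + s - 1) / s).toNat + 1 := by
      have e : b - a + s - 1 = (b - (a + s) + s - 1) + 1 * s := by ring
      rw [e, Int.add_mul_ediv_right _ _ (by omega : s ≠ 0)]
      have hnn : 0 ≤ (b - (a + s) + s - 1) / s := Int.ediv_nonneg (by omega) (by omega)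
      omega
    rw [key, List.range_succ_eq_map]
    simp only [List.map_cons, List.map_map, Nat.cast_zero, mul_zero, add_zero]
    congr 1
    apply List.map_congr_left
    intro x _
    simp [Function.comp]
    ring
  · rw [if_neg h2]
    have key : ((b - a + s - 1) / s).toNat = 1 := by
      have h1 : (b - a + s - 1) / s = 1 := by
        have hge : (1:Int) ≤ (b - a + s - 1) / s := by
          rw [Int.le_ediv_iff_mul_le hs]; omega
        have hlt : (b - a + s - 1) / s < 1 + 1 := by
          rw [Int.ediv_lt_iff_lt_mul hs]; omega
        omega
      omega
    rw [key]
    simp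

-- getD through a drop, on Int indices
lemma pyGetD_drop (s : List Int) (t i : Int) (ht : 0 ≤ t) (hi : 0 ≤ i) :
    PySem.List.pyGetD (s.drop t.toNat) i 0 = PySem.List.pyGetD s (t + i) 0 := by
  have e2 : t + i = (((t.toNat + i.toNat : Nat) : Nat) : Int) := by omega
  have e1 : i = ((i.toNat : Nat) : Int) := by omega
  rw [e2, e1, PySem.List.pyGetD_natCast, PySem.List.pyGetD_natCast]
  simp [List.getD_eq_getElem?_getD, List.getElem?_drop]
  congr 2
  omega

-- (L1) absorbing one value-block into boxL: floor(n/m) boxes close, n mod m items are left over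
lemma boxL_replicate (m : Int) (hm : 1 ≤ m) (v : Int) :
    ∀ (c : Nat) (l : Int), 0 ≤ l → l < m → ∀ rest : List Int,
    boxL m l (List.replicate c v ++ rest)
      = PySem.Int.floordiv (l + c) m * v + boxL m (PySem.Int.mod (l + c) m) rest := by
  intro c
  induction c using Nat.strong_induction_on with
  | _ c ih =>
    intro l hl0 hlm rest
    rw [PySem.Int.floordiv_eq_ediv_of_pos (by omega), PySem.Int.mod_eq_emod_of_pos (by omega)]
    by_cases hcase : l + (c : Int) < m
    · -- no box completes inside the replicate block
      rw [Int.ediv_eq_zero_of_lt (by omega) hcase, Int.emod_eq_of_lt (by omega) hcase]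
      simp only [zero_mul, zero_add]
      by_cases hfull : m ≤ l + (c : Int) + rest.length
      · rw [boxL_step m l (List.replicate c v ++ rest)
              (by simp only [List.length_append, List.length_replicate]; push_cast; omega)]
        rw [boxL_step m (l + c) rest ⟨by omega, by omega, by omega, by omega⟩]
        have e1 : (List.replicate c v ++ rest).getD (m - l - 1).toNat 0
            = rest.getD (m - (l + c) - 1).toNat 0 := by
          rw [List.getD_append_right _ _ _ _ (by simp only [List.length_replicate]; omega)]
          congr 1
          simp only [List.length_replicate]
          omega
        have e2 : (List.replicate c v ++ rest).drop (m - l).toNat = rest.drop (m - (l + c)).toNat := by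
          rw [List.drop_append, List.drop_replicate]
          simp only [List.length_replicate]
          have h0 : c - (m - l).toNat = 0 := by omega
          rw [h0]
          simp only [List.replicate_zero, List.nil_append]
          congr 1
          omega
        rw [e1, e2]
      · rw [boxL_zero m l _
              (by simp only [List.length_append, List.length_replicate]; push_cast; omega),
            boxL_zero m (l + c) rest (by omega)]
    · -- one box completes inside the replicate block; recurse on its remainder
      have hc' : (m - l).toNat ≤ c := by omega
      rw [boxL_step m l (List.replicate c v ++ rest)
            (by simp only [List.length_append, List.length_replicate]; push_cast; omega)]
      rw [List.getD_append _ _ _ _ (by simp only [List.length_replicate]; omega),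
          List.getD_replicate _ (by omega)]
      have e2 : (List.replicate c v ++ rest).drop (m - l).toNat
          = List.replicate (c - (m - l).toNat) v ++ rest := by
        rw [List.drop_append, List.drop_replicate]
        simp only [List.length_replicate]
        have h0 : (m - l).toNat - c = 0 := by omega
        rw [h0, List.drop_zero]
      rw [e2, ih (c - (m - l).toNat) (by omega) 0 le_rfl (by omega) rest]
      simp only [zero_add]
      rw [PySem.Int.floordiv_eq_ediv_of_pos (by omega), PySem.Int.mod_eq_emod_of_pos (by omega)]
      have e : l + (c : Int) = ((c - (m - l).toNat : Nat) : Int) + 1 * m := by omega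
      rw [e, Int.add_mul_ediv_right _ _ (by omega : m ≠ 0), Int.add_mul_emod_self_right]
      ring

-- (L2) A's loop computes boxL of the flattened descending list
lemma loopA_eq (m : Int) (hm : 1 ≤ m) (score : List Int) :
    ∀ (K : Nat) (ans left : Int), 0 ≤ left → left < m →
    ((PySem.List.pyRange (K : Int) 0 (-1)).foldl
      (fun (st : Int × Int) i =>
        (st.1 + PySem.Int.floordiv ((score.count i : Int) + st.2) m * i * m,
         PySem.Int.mod ((score.count i : Int) + st.2) m))
      (ans, left)).1
    = ans + boxL m left (flatD score K) * m := by
  intro K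
  induction K with
  | zero =>
    intro ans left h0 h1
    rw [PySem.List.pyRange_neg_one_eq_nil (by norm_num)]
    rw [boxL_zero m left (flatD score 0) (by simp [flatD]; omega)]
    simp
  | succ n ih =>
    intro ans left h0 h1
    rw [PySem.List.pyRange_neg_one_cons (by push_cast; omega)]
    simp only [List.foldl_cons]
    have hcast : ((n + 1 : Nat) : Int) - 1 = (n : Int) := by push_cast; ring
    rw [hcast]
    have hml : 0 < m := by omega
    have hmod0 : 0 ≤ PySem.Int.mod ((score.count ((n + 1 : Nat) : Int) : Int) + left) m := by
      rw [PySem.Int.mod_eq_emod_of_pos hml]; exact Int.emod_nonneg _ (by omega)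
    have hmod1 : PySem.Int.mod ((score.count ((n + 1 : Nat) : Int) : Int) + left) m < m := by
      rw [PySem.Int.mod_eq_emod_of_pos hml]; exact Int.emod_lt_of_pos _ hml
    rw [ih _ _ hmod0 hmod1]
    have hflat : flatD score (n + 1)
        = List.replicate (score.count ((n + 1 : Nat) : Int)) ((n + 1 : Nat) : Int) ++ flatD score n := rfl
    rw [hflat, boxL_replicate m hm _ _ left h0 h1 (flatD score n)]
    rw [show left + ((score.count ((n + 1 : Nat) : Int) : Int))
        = (score.count ((n + 1 : Nat) : Int) : Int) + left by ring]
    ring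

-- shifting B's index range by t is dropping t elements of s
lemma foldB_shift (m t : Int) (hm : 1 ≤ m) (ht : 0 ≤ t) (s : List Int) :
    ∀ (fuel : Nat) (a b a0 : Int), 0 ≤ a → (b - a).toNat ≤ fuel →
    (PySem.List.pyRange (a + t) (b + t) m).foldl (fun x i => x + PySem.List.pyGetD s i 0 * m) a0
    = (PySem.List.pyRange a b m).foldl (fun x i => x + PySem.List.pyGetD (s.drop t.toNat) i 0 * m) a0 := by
  intro fuel
  induction fuel with
  | zero =>
    intro a b a0 ha hf
    rw [pyRange_pos_nil _ _ _ (by omega) (by omega), pyRange_pos_nil _ _ _ (by omega) (by omega)]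
    rfl
  | succ f ihf =>
    intro a b a0 ha hf
    by_cases hab : a < b
    · rw [pyRange_pos_cons (a + t) (b + t) m (by omega) (by omega), pyRange_pos_cons a b m (by omega) hab]
      simp only [List.foldl_cons]
      rw [pyGetD_drop s t a ht ha, show t + a = a + t by ring]
      have e : a + t + m = a + m + t := by ring
      rw [e, ihf (a + m) b _ (by omega) (by omega)]
    · rw [pyRange_pos_nil _ _ _ (by omega) (by omega), pyRange_pos_nil _ _ _ (by omega) (by omega)]
      rfl

-- (L3) B's fold computes boxL with no leftover
lemma foldB_eq (m : Int) (hm : 1 ≤ m) :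
    ∀ (N : Nat), ∀ (s : List Int), s.length ≤ N → ∀ a0 : Int,
    (PySem.List.pyRange (m - 1) ((s.length : Int)) m).foldl
      (fun answer i => answer + PySem.List.pyGetD s i 0 * m) a0
    = a0 + boxL m 0 s * m := by
  intro N
  induction N with
  | zero =>
    intro s hs a0
    rw [pyRange_pos_nil _ _ _ (by omega) (by omega), boxL_zero _ _ _ (by omega)]
    simp
  | succ f ihf =>
    intro s hs a0
    by_cases hlen : (s.length : Int) < m
    · rw [pyRange_pos_nil _ _ _ (by omega) (by omega), boxL_zero _ _ _ (by omega)]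
      simp
    · rw [pyRange_pos_cons (m - 1) (s.length : Int) m (by omega) (by omega)]
      simp only [List.foldl_cons]
      have e1 : (m - 1 + m) = (m - 1) + m := by ring
      have e2 : ((s.length : Int)) = ((s.length : Int) - m) + m := by ring
      rw [e1, e2, foldB_shift m m hm (by omega) s f (m - 1) ((s.length : Int) - m) _ (by omega) (by omega)]
      have e3 : (s.length : Int) - m = (((s.drop m.toNat).length : Nat) : Int) := by
        simp only [List.length_drop]; omega
      rw [e3, ihf (s.drop m.toNat) (by simp only [List.length_drop]; omega)]
      rw [boxL_step m 0 s (by omega)]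
      have e4 : PySem.List.pyGetD s (m - 1) 0 = s.getD (m - 1).toNat 0 := by
        rw [show m - 1 = (((m - 1).toNat : Nat) : Int) by omega, PySem.List.pyGetD_natCast]
        congr 1
      rw [e4]
      have e5 : m - 0 - 1 = m - 1 := by ring
      have e6 : m - 0 = m := by ring
      rw [e5, e6]
      ring

-- (L4) the sorted-descending filtered list is flatD
lemma count_flatD (score : List Int) (v : Int) :
    ∀ K : Nat, (flatD score K).count v = if 1 ≤ v ∧ v ≤ (K : Int) then score.count v else 0 := by
  intro K
  induction K with
  | zero => simp [flatD]; omega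
  | succ n ih =>
    simp only [flatD, List.count_append, ih, List.count_replicate]
    by_cases hv : v = ((n + 1 : Nat) : Int)
    · rw [if_pos (by exact_mod_cast beq_iff_eq.mpr hv.symm), if_neg (by omega), if_pos (by push_cast; omega)]
      subst hv; omega
    · rw [if_neg (by simpa using fun h => hv h.symm)]
      by_cases h1 : 1 ≤ v ∧ v ≤ (n : Int)
      · rw [if_pos h1, if_pos (by push_cast; omega)]; omega
      · rw [if_neg h1, if_neg (by push_cast; omega)]

lemma mem_flatD_bounds (score : List Int) : ∀ K : Nat, ∀ x ∈ flatD score K, 1 ≤ x ∧ x ≤ (K : Int) := by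
  intro K
  induction K with
  | zero => simp [flatD]
  | succ n ih =>
    intro x hx
    simp only [flatD, List.mem_append] at hx
    rcases hx with h | h
    · rcases List.eq_of_mem_replicate h with rfl
      constructor <;> [push_cast; push_cast] <;> omega
    · have := ih x h
      push_cast
      push_cast at this
      omega

lemma pairwise_flatD (score : List Int) : ∀ K : Nat, (flatD score K).Pairwise (fun a b => b ≤ a) := by
  intro K
  induction K with
  | zero => simp [flatD]
  | succ n ih =>
    simp only [flatD, List.pairwise_append]
    refine ⟨List.pairwise_replicate.mpr (Or.inr le_rfl), ih, ?_⟩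
    intro a ha b hb
    rcases List.eq_of_mem_replicate ha with rfl
    have := mem_flatD_bounds score n b hb
    push_cast
    omega

lemma sorted_eq_flatD (score : List Int) (k : Int) :
    PySem.List.sorted (score.filter (fun x => decide (1 ≤ x ∧ x ≤ k))) (fun x => x) true
      = flatD score k.toNat := by
  apply List.eq_of_perm_of_sorted (le := fun a b : Int => b ≤ a)
  · intro a b _ _ h1 h2; omega
  · exact PySem.List.sorted_pairwise_rev _ _
  · exact pairwise_flatD score k.toNat
  · apply (PySem.List.sorted_perm _ _ _).trans
    apply List.perm_iff_count.mpr
    intro v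
    rw [count_flatD]
    by_cases hv : 1 ≤ v ∧ v ≤ k
    · rw [if_pos (by omega), List.count_filter (by simpa using hv)]
    · rw [if_neg (by omega), List.count_eq_zero]
      intro hmem
      have := List.of_mem_filter hmem
      simp at this
      omega

-- ===== VERDICT (by name: the statement is the Claim_ definition above) =====
theorem solution_spec : Claim_equal_solution := by
  intro k m score _ hpre
  show solution k m score = solution_alt k m score
  simp only [solution, solution_alt]
  rcases hpre with hm | ⟨hm, hk⟩
  · -- positive box size
    rw [sorted_eq_flatD score k]
    rw [foldB_eq m hm (flatD score k.toNat).length _ le_rfl 0]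
    have fe : (fun (st : Int × Int) i =>
        (st.1 + PySem.Int.floordiv ((PySem.Dict.counter score).getD i 0 + st.2) m * i * m,
         PySem.Int.mod ((PySem.Dict.counter score).getD i 0 + st.2) m))
      = (fun (st : Int × Int) i =>
        (st.1 + PySem.Int.floordiv ((score.count i : Int) + st.2) m * i * m,
         PySem.Int.mod ((score.count i : Int) + st.2) m)) := by
      funext st i
      simp [PySem.Dict.getD_counter]
    rw [fe]
    have hr : PySem.List.pyRange k 0 (-1) = PySem.List.pyRange ((k.toNat : Nat) : Int) 0 (-1) := by
      by_cases hk0 : 0 ≤ k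
      · congr 1; omega
      · rw [PySem.List.pyRange_neg_one_eq_nil (by omega), PySem.List.pyRange_neg_one_eq_nil (by omega)]
    rw [hr, loopA_eq m hm score k.toNat 0 0 le_rfl (by omega)]
  · -- negative box size with an empty value range: both sides fold over an empty list
    rw [PySem.List.pyRange_neg_one_eq_nil (by omega)]
    have hf : score.filter (fun x => decide (1 ≤ x ∧ x ≤ k)) = [] := by
      apply List.filter_eq_nil_iff.mpr
      intro x hx
      simp
      omega
    rw [hf]
    have hs : PySem.List.sorted ([] : List Int) (fun x : Int => x) true = [] := by
      rw [PySem.List.sorted_eq_nil_iff]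
    rw [hs]
    simp only [List.length_nil, Nat.cast_zero]
    have hr2 : PySem.List.pyRange (m - 1) 0 m = [] := by
      simp only [PySem.List.pyRange]
      rw [if_neg (by omega : ¬ m = 0)]
      rw [if_neg (by omega : ¬ (0:Int) < m), if_neg (by omega : ¬ (0:Int) < m - 1)]
      simp
    rw [hr2]
    rfl
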